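-- pv_equiv track=rewrite | github.com/zmij/nomanssky | nomanssky/_coords.py | portal_string_parser
-- ===== SOURCE A (Python) =====
-- from enum import IntEnum, Enum
--
-- class _PortalCodeState(IntEnum):
--     planet = 0
--     star_system = 1
--     y = 2
--     z = 3
--     x = 4
--     DONE = 5
--     INCOMPLETE = 100499
--     ERROR = 100500
--
--     def next(self) -> "_PortalCodeState":
--         return _PortalCodeState(self.value + 1)
--
-- _PORTAL_TOKEN_LENGHT = {
--     _PortalCodeState.planet: 1,
--     _PortalCodeState.star_system: 3,
--     _PortalCodeState.y: 2,
--     _PortalCodeState.z: 3,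
--     _PortalCodeState.x: 3,
-- }
--
-- def portal_string_parser(portal_code: str):
--     state = _PortalCodeState.planet
--     curr_val = 0
--     token = ""
--     token_length = _PORTAL_TOKEN_LENGHT[state]
--
--     last_idx = -1
--     for n, c in enumerate(portal_code):
--         try:
--             v = int(c, 16)
--             last_idx = n
--             curr_val = curr_val * 16 + v
--             token += c
--             if len(token) == token_length:
--                 yield curr_val, state, last_idx
--
--                 if state == _PortalCodeState.x:
--                     return
--
--                 curr_val = 0
--                 token = ""
--                 state = state.next()
--                 token_length = _PORTAL_TOKEN_LENGHT[state]
--         except ValueError: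
--             yield curr_val, _PortalCodeState.ERROR, last_idx
--             return
--     if token:
--         yield curr_val, _PortalCodeState.INCOMPLETE, last_idx
-- ===== SOURCE B (Python) =====
-- def portal_string_parser(portal_code):
--     # Field table: (state value, hex-digit count) for planet, star_system, y, z, x.
--     fields = ((0, 1), (1, 3), (2, 2), (3, 3), (4, 3))
--     i = 0
--     last_idx = -1
--     for state, length in fields:
--         curr_val = 0
--         consumed = 0
--         for _ in range(length):
--             if i >= len(portal_code):
--                 if consumed:
--                     yield curr_val, 100499, last_idx  # INCOMPLETE
--                 return
--             c = portal_code[i]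
--             try:
--                 v = int(c, 16)
--             except ValueError:
--                 yield curr_val, 100500, last_idx  # ERROR
--                 return
--             last_idx = i
--             curr_val = curr_val * 16 + v
--             i += 1
--             consumed += 1
--         yield curr_val, state, last_idx
-- ===== Notes on version B (the rewrite author's own statement) =====
-- stated objective: simpler
-- what changed: Replaced the single-pass state machine (mutable state enum, token string, per-char boundary checks) by an explicit field table ((state,length) pairs) with an outer loop over fields and an inner loop consuming exactly `length` hex digits per field.
import Mathlib
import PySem

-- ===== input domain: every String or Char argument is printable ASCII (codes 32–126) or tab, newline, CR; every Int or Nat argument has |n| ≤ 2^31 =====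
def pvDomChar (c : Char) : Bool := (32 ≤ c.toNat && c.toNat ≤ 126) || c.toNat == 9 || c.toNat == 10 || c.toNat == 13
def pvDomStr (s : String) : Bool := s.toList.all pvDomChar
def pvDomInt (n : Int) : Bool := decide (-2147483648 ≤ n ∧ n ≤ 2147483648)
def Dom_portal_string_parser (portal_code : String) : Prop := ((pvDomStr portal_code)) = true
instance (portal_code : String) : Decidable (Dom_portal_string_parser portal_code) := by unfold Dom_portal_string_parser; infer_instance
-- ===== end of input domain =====

-- B replaces A's incremental state machine by a per-field table loop: simpler decomposition, same O(1)-bounded work.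
-- Both ports return the list of values the Python generator yields, in order.

-- int(c, 16) for a single printable-ASCII char: the hex digit's value, none = ValueError (shared by both ports)
def hexVal? (c : Char) : Option Int :=
  if '0' ≤ c ∧ c ≤ '9' then some ((c.toNat : Int) - 48)
  else if 'a' ≤ c ∧ c ≤ 'f' then some ((c.toNat : Int) - 87)
  else if 'A' ≤ c ∧ c ≤ 'F' then some ((c.toNat : Int) - 55)
  else none

-- ===== PORT A =====
-- _PORTAL_TOKEN_LENGHT[state]
def tokLen (state : Int) : Int :=
  if state = 0 then 1 else if state = 1 then 3 else if state = 2 then 2 else 3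

-- the `for n, c in enumerate(portal_code)` loop (cs = remaining chars, n = current index)
def aLoop (cs : List Char) (n : Nat) (state curr : Int) (token : List Char)
    (tokenLength lastIdx : Int) : List (Int × Int × Int) :=
  match cs with
  | [] => if token ≠ [] then [(curr, 100499, lastIdx)] else []
  | c :: rest =>
    match hexVal? c with
    | none => [(curr, 100500, lastIdx)]
    | some v =>
      let lastIdx' : Int := (n : Int)
      let curr' := curr * 16 + v
      let token' := token ++ [c]
      if (token'.length : Int) = tokenLength then
        (curr', state, lastIdx') ::
          (if state = 4 then []
           else aLoop rest (n + 1) (state + 1) 0 [] (tokLen (state + 1)) lastIdx')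
      else aLoop rest (n + 1) state curr' token' tokenLength lastIdx'

def portal_string_parser (portal_code : String) : List (Int × Int × Int) :=
  aLoop portal_code.toList 0 0 0 [] (tokLen 0) (-1)

-- ===== PORT B =====
-- one field's inner `for _ in range(length)` loop; inl (curr_val, last_idx, i) = field completed,
-- inr out = the generator finished with output `out`
def bField (cs : List Char) (i rem consumed : Nat) (curr lastIdx : Int) :
    (Int × Int × Nat) ⊕ List (Int × Int × Int) :=
  match rem with
  | 0 => Sum.inl (curr, lastIdx, i)
  | r + 1 =>
    match cs[i]? with
    | none => Sum.inr (if consumed ≠ 0 then [(curr, 100499, lastIdx)] else [])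
    | some c =>
      match hexVal? c with
      | none => Sum.inr [(curr, 100500, lastIdx)]
      | some v => bField cs (i + 1) r (consumed + 1) (curr * 16 + v) (i : Int)

-- the outer `for state, length in fields` loop
def bOuter (cs : List Char) (fields : List (Int × Nat)) (i : Nat) (lastIdx : Int) :
    List (Int × Int × Int) :=
  match fields with
  | [] => []
  | (st, len) :: fs =>
    match bField cs i len 0 0 lastIdx with
    | Sum.inr out => out
    | Sum.inl (curr, li, i') => (curr, st, li) :: bOuter cs fs i' li

def portal_string_parser_alt (portal_code : String) : List (Int × Int × Int) :=
  bOuter portal_code.toList [(0, 1), (1, 3), (2, 2), (3, 3), (4, 3)] 0 (-1)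

-- ===== PRECONDITION & SPEC =====
def Spec_portal_string_parser (portal_code : String) (out : List (Int × Int × Int)) : Prop := out = portal_string_parser_alt portal_code
instance (portal_code : String) (out : List (Int × Int × Int)) : Decidable (Spec_portal_string_parser portal_code out) := by unfold Spec_portal_string_parser; infer_instance

-- ===== CLAIM (what is proved, stated in full; the proofs are below) =====
def Claim_equal_portal_string_parser : Prop := ∀ (portal_code : String), Dom_portal_string_parser portal_code → Spec_portal_string_parser portal_code (portal_string_parser portal_code)

-- ===== LEMMAS AND PROOFS =====

-- A's loop inside one field equals B's bField followed by A's continuation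
theorem inner (rem : Nat) : ∀ (cs : List Char) (i : Nat) (st curr lastIdx : Int)
    (consumed : Nat) (token : List Char),
    token.length = consumed → ((consumed : Int) + (rem : Int) = tokLen st) → 0 < rem →
    aLoop (cs.drop i) i st curr token (tokLen st) lastIdx =
      (match bField cs i rem consumed curr lastIdx with
       | Sum.inr out => out
       | Sum.inl (c', li, i') => (c', st, li) ::
           (if st = 4 then []
            else aLoop (cs.drop i') i' (st + 1) 0 [] (tokLen (st + 1)) li)) := by
  induction rem with
  | zero => intro _ _ _ _ _ _ _ _ _ h; omega
  | succ r ih =>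
    intro cs i st curr lastIdx consumed token hlen hsum _
    rcases hd : cs.drop i with _ | ⟨c, rest⟩
    · have hget : cs[i]? = none := by
        have := List.drop_eq_nil_iff.mp hd
        exact List.getElem?_eq_none (by omega)
      simp only [aLoop, bField, hget]
      by_cases hc : consumed = 0
      · have : token = [] := List.eq_nil_of_length_eq_zero (hlen.trans hc)
        simp [this, hc]
      · have : token ≠ [] := by
          intro h; apply hc; rw [← hlen, h]; rfl
        simp [this, hc]
    · have hget : cs[i]? = some c := by
        have h0 : (cs.drop i)[0]? = some c := by rw [hd]; rfl
        rw [List.getElem?_drop] at h0; simpa using h0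
      have hrest : cs.drop (i + 1) = rest := by
        have : (cs.drop i).drop 1 = cs.drop (i + 1) := by
          rw [List.drop_drop]
        rw [← this, hd]; rfl
      simp only [aLoop, bField, hget]
      cases hv : hexVal? c with
      | none => simp
      | some v =>
        simp only []
        by_cases hb : r = 0
        · subst hb
          have hlast : ((token ++ [c]).length : Int) = tokLen st := by
            simp [hlen]; omega
          rw [if_pos hlast]
          simp [bField, hrest]
        · have hlast : ¬ ((token ++ [c]).length : Int) = tokLen st := by
            simp [hlen]; omega
          rw [if_neg hlast]
          rw [← hrest]
          exact ih cs (i + 1) st (curr * 16 + v) (i : Int) (consumed + 1) (token ++ [c])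
            (by simp [hlen]) (by push_cast; push_cast at hsum; omega) (by omega)

-- A from the start of field `st` equals B's remaining-fields loop, per field
theorem field4 (cs : List Char) (i : Nat) (li : Int) :
    aLoop (cs.drop i) i 4 0 [] (tokLen 4) li = bOuter cs [(4, 3)] i li := by
  rw [inner 3 cs i 4 0 li 0 [] rfl (by norm_num [tokLen]) (by omega)]
  simp only [bOuter]
  rcases h : bField cs i 3 0 0 li with ⟨c', li', i'⟩ | out <;> simp

theorem field3 (cs : List Char) (i : Nat) (li : Int) :
    aLoop (cs.drop i) i 3 0 [] (tokLen 3) li = bOuter cs [(3, 3), (4, 3)] i li := by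
  rw [inner 3 cs i 3 0 li 0 [] rfl (by norm_num [tokLen]) (by omega)]
  simp only [bOuter]
  rcases h : bField cs i 3 0 0 li with ⟨c', li', i'⟩ | out <;>
    simp [field4, bOuter, show (3:Int) + 1 = 4 by norm_num]

theorem field2 (cs : List Char) (i : Nat) (li : Int) :
    aLoop (cs.drop i) i 2 0 [] (tokLen 2) li = bOuter cs [(2, 2), (3, 3), (4, 3)] i li := by
  rw [inner 2 cs i 2 0 li 0 [] rfl (by norm_num [tokLen]) (by omega)]
  simp only [bOuter]
  rcases h : bField cs i 2 0 0 li with ⟨c', li', i'⟩ | out <;>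
    simp [field3, bOuter, show (2:Int) + 1 = 3 by norm_num]

theorem field1 (cs : List Char) (i : Nat) (li : Int) :
    aLoop (cs.drop i) i 1 0 [] (tokLen 1) li = bOuter cs [(1, 3), (2, 2), (3, 3), (4, 3)] i li := by
  rw [inner 3 cs i 1 0 li 0 [] rfl (by norm_num [tokLen]) (by omega)]
  simp only [bOuter]
  rcases h : bField cs i 3 0 0 li with ⟨c', li', i'⟩ | out <;>
    simp [field2, bOuter, show (1:Int) + 1 = 2 by norm_num]

-- ===== VERDICT (by name: the statement is the Claim_ definition above) =====
theorem portal_string_parser_spec : Claim_equal_portal_string_parser := by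
  intro s _
  unfold Spec_portal_string_parser portal_string_parser portal_string_parser_alt
  have h0 : s.toList = s.toList.drop 0 := rfl
  rw [h0, inner 1 s.toList 0 0 0 (-1) 0 [] rfl (by norm_num [tokLen]) (by omega)]
  simp only [bOuter]
  rcases h : bField s.toList 0 1 0 0 (-1) with ⟨c', li', i'⟩ | out <;>
    simp [h, field1, bOuter, show (0:Int) + 1 = 1 by norm_num]
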